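-- pv_equiv track=rewrite | github.com/Rafa09MID/KanCode-NasaHackathon | BackEnd/app.py | _compose_context
-- ===== SOURCE A (Python) =====
-- from typing import List, Optional
--
-- def _format_citation(doc):
--     title = doc.get("titulo") or ""
--     pid = doc.get("_id")
--     year = doc.get("publication_date")
--     doi = doc.get("doi")
--     url = doc.get("url")
--     return f"[{pid} - {year}] {title} (DOI: {doi}) {url or ''}".strip()
--
-- def _compose_context(docs: List[dict], max_chars: int):
--
--     parts = []
--     total = 0
--     for d in docs:
--         head = f"### {_format_citation(d)}\n"
--         body = (d.get("abstract") or "")[:800]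
--         block = head + body + "\n\n"
--         if total + len(block) > max_chars:
--             break
--         parts.append(block)
--         total += len(block)
--     return "\n".join(parts)
-- ===== SOURCE B (Python) =====
-- def _format_citation(doc):
--     title = doc.get("titulo") or ""
--     pid = doc.get("_id")
--     year = doc.get("publication_date")
--     doi = doc.get("doi")
--     url = doc.get("url")
--     return f"[{pid} - {year}] {title} (DOI: {doi}) {url or ''}".strip()
--
--
-- def _compose_context(docs, max_chars):
--     blocks = [f"### {_format_citation(d)}\n{(d.get('abstract') or '')[:800]}\n\n"
--               for d in docs]
--     prefix = []
--     total = 0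
--     for b in blocks:
--         total += len(b)
--         prefix.append(total)
--     # prefix is nondecreasing (block lengths are nonnegative), so the greedy
--     # cutoff is the largest k with prefix[k-1] <= max_chars, found by binary search.
--     lo, hi = 0, len(blocks)
--     while lo < hi:
--         mid = (lo + hi) // 2
--         if prefix[mid] <= max_chars:
--             lo = mid + 1
--         else:
--             hi = mid
--     return "\n".join(blocks[:lo])
-- ===== Notes on version B (the rewrite author's own statement) =====
-- stated objective: alternative
-- what changed: Instead of A's sequential accumulate-and-break loop, B builds a prefix-sum table of the formatted block lengths and binary-searches it (bisect-style) for the greedy cutoff, exploiting that prefix sums of nonnegative lengths are monotone.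
import Mathlib
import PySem

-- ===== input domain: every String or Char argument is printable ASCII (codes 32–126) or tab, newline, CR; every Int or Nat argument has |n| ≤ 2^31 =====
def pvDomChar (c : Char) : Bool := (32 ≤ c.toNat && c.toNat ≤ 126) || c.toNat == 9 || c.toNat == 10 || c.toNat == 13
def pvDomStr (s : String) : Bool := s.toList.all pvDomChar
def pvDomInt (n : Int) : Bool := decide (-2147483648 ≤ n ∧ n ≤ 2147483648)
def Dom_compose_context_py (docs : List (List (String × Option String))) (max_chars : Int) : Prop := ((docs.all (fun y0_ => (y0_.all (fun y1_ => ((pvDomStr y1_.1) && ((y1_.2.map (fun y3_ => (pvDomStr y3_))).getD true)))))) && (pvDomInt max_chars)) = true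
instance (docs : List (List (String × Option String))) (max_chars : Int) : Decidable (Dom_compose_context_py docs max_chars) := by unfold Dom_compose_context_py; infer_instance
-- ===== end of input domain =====

-- B replaces A's sequential accumulate-and-break loop by a prefix-sum table plus a
-- binary search for the greedy cutoff (alternative algorithm, same overall cost).

-- ===== PORT A =====
-- d.get(k): first-match lookup in the association list (exact for Python dicts, which have unique keys)
def pvGet : List (String × Option String) → String → Option (Option String)
  | [], _ => none
  | (k, v) :: rest, key => if k == key then some v else pvGet rest key

-- _format_citation; `x or ''` = getD "" on the flattened lookup, f-string of a None value prints "None"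
def fmtCitation (d : List (String × Option String)) : List Char :=
  let title := ((pvGet d "titulo").join).getD ""
  let pid := ((pvGet d "_id").join).getD "None"
  let year := ((pvGet d "publication_date").join).getD "None"
  let doi := ((pvGet d "doi").join).getD "None"
  let url := ((pvGet d "url").join).getD ""
  PySem.Chars.strip ("[".toList ++ pid.toList ++ " - ".toList ++ year.toList ++ "] ".toList ++ title.toList ++ " (DOI: ".toList ++ doi.toList ++ ") ".toList ++ url.toList)

-- the for-loop of A, with accumulators parts and total
def composeLoopA (max_chars : Int) : List (List (String × Option String)) → List (List Char) → Int → List (List Char)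
  | [], parts, _ => parts
  | d :: rest, parts, total =>
    let head := "### ".toList ++ fmtCitation d ++ "\n".toList
    let body := ((((pvGet d "abstract").join).getD "").toList).take 800
    let block := head ++ body ++ "\n\n".toList
    if total + (block.length : Int) > max_chars then parts
    else composeLoopA max_chars rest (parts ++ [block]) (total + (block.length : Int))

def compose_context_py (docs : List (List (String × Option String))) (max_chars : Int) : String :=
  String.ofList (PySem.Chars.join "\n".toList (composeLoopA max_chars docs [] 0))

-- ===== PORT B =====
-- one formatted block per doc (B's list comprehension body)
def pvBlock (d : List (String × Option String)) : List Char :=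
  "### ".toList ++ fmtCitation d ++ "\n".toList ++ ((((pvGet d "abstract").join).getD "").toList).take 800 ++ "\n\n".toList

-- Source B's prefix-sum loop: running totals of the block lengths
def pvPrefixSums : List (List Char) → Int → List Int
  | [], _ => []
  | b :: bs, total => (total + (b.length : Int)) :: pvPrefixSums bs (total + (b.length : Int))

-- Source B's binary-search while-loop; prefix.getD mid 0 = prefix[mid] (always in range: lo < hi ≤ len)
def pvBisect (pre : List Int) (m : Int) (lo hi : Nat) : Nat :=
  if _h : lo < hi then
    let mid := (lo + hi) / 2
    if pre.getD mid 0 ≤ m then pvBisect pre m (mid + 1) hi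
    else pvBisect pre m lo mid
  else lo
termination_by hi - lo
decreasing_by all_goals omega

def compose_context_py_alt (docs : List (List (String × Option String))) (max_chars : Int) : String :=
  let blocks := docs.map pvBlock
  let pre := pvPrefixSums blocks 0
  let lo := pvBisect pre max_chars 0 blocks.length
  String.ofList (PySem.Chars.join "\n".toList (blocks.take lo))

-- ===== PRECONDITION & SPEC =====
def Spec_compose_context_py (docs : List (List (String × Option String))) (max_chars : Int) (out : String) : Prop := out = compose_context_py_alt docs max_chars
instance (docs : List (List (String × Option String))) (max_chars : Int) (out : String) : Decidable (Spec_compose_context_py docs max_chars out) := by unfold Spec_compose_context_py; infer_instance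

-- ===== CLAIM (what is proved, stated in full; the proofs are below) =====
def Claim_equal_compose_context_py : Prop := ∀ (docs : List (List (String × Option String))) (max_chars : Int), Dom_compose_context_py docs max_chars → Spec_compose_context_py docs max_chars (compose_context_py docs max_chars)

-- ===== LEMMAS AND PROOFS =====

-- A's loop appends exactly the longest prefix of blocks whose running sums stay ≤ max_chars
theorem composeLoopA_eq (max_chars : Int) :
    ∀ (ds : List (List (String × Option String))) (parts : List (List Char)) (total : Int),
      composeLoopA max_chars ds parts total =
        parts ++ (ds.map pvBlock).take
          ((pvPrefixSums (ds.map pvBlock) total).takeWhile (fun s => s ≤ max_chars)).length := by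
  intro ds
  induction ds with
  | nil => intro parts total; simp [composeLoopA, pvPrefixSums]
  | cons d rest ih =>
    intro parts total
    simp only [composeLoopA]
    rw [show "### ".toList ++ fmtCitation d ++ "\n".toList ++
          ((pvGet d "abstract").join.getD "").toList.take 800 ++ "\n\n".toList = pvBlock d from rfl]
    simp only [List.map_cons, pvPrefixSums, List.takeWhile_cons]
    by_cases h : total + ((pvBlock d).length : Int) ≤ max_chars
    · rw [if_neg (by omega), ih]
      simp [h, List.append_assoc]
    · rw [if_pos (by omega)]
      simp [h]

-- every running total in pvPrefixSums is ≥ the starting total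
theorem pvPrefixSums_ge (bs : List (List Char)) : ∀ (t : Int) (x : Int), x ∈ pvPrefixSums bs t → t ≤ x := by
  induction bs with
  | nil => intro t x hx; simp [pvPrefixSums] at hx
  | cons b bs ih =>
    intro t x hx
    simp only [pvPrefixSums, List.mem_cons] at hx
    rcases hx with h | h
    · omega
    · have := ih _ _ h; omega

-- the prefix-sum table is monotone nondecreasing
theorem pvPrefixSums_pairwise (bs : List (List Char)) : ∀ (t : Int), (pvPrefixSums bs t).Pairwise (· ≤ ·) := by
  induction bs with
  | nil => intro t; simp [pvPrefixSums]
  | cons b bs ih =>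
    intro t
    simp only [pvPrefixSums, List.pairwise_cons]
    exact ⟨fun x hx => pvPrefixSums_ge bs _ x hx, ih _⟩

theorem pvPrefixSums_length (bs : List (List Char)) : ∀ (t : Int), (pvPrefixSums bs t).length = bs.length := by
  induction bs with
  | nil => intro t; simp [pvPrefixSums]
  | cons b bs ih => intro t; simp [pvPrefixSums, ih]

-- indexwise monotonicity via getD
theorem pairwise_getD_mono (p : List Int) (hp : p.Pairwise (· ≤ ·)) :
    ∀ (i j : Nat), i ≤ j → j < p.length → p.getD i 0 ≤ p.getD j 0 := by
  intro i j hij hj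
  rcases Nat.eq_or_lt_of_le hij with rfl | hlt
  · exact le_refl _
  · have hi : i < p.length := Nat.lt_trans hlt hj
    rw [List.getD_eq_getElem p 0 hi, List.getD_eq_getElem p 0 hj]
    exact List.pairwise_iff_getElem.mp hp i j hi hj hlt

-- takeWhile length is determined by: all entries before r satisfy P, entry r (if any) fails P
theorem takeWhile_length_eq (P : Int → Bool) :
    ∀ (p : List Int) (r : Nat), r ≤ p.length →
      (∀ i, i < r → P (p.getD i 0) = true) →
      (r < p.length → P (p.getD r 0) = false) →
      (p.takeWhile P).length = r := by
  intro p
  induction p with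
  | nil => intro r hr _ _; simp at hr; simp [hr]
  | cons x xs ih =>
    intro r hr hall hfail
    cases r with
    | zero =>
      have := hfail (by simp)
      simp only [List.getD_cons_zero] at this
      simp [this]
    | succ r =>
      have hx : P x = true := by
        have := hall 0 (Nat.succ_pos r)
        simpa using this
      simp only [List.takeWhile_cons, hx, if_true, List.length_cons]
      congr 1
      apply ih r (by simpa using hr)
      · intro i hi
        have := hall (i + 1) (by omega)
        simpa using this
      · intro hlt
        have := hfail (by simpa using Nat.succ_lt_succ hlt)
        simpa using this

-- binary search on a monotone table returns exactly the takeWhile cutoff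
theorem pvBisect_eq (p : List Int) (m : Int) (hp : p.Pairwise (· ≤ ·)) :
    ∀ (lo hi : Nat), lo ≤ hi → hi ≤ p.length →
      (∀ i, i < lo → p.getD i 0 ≤ m) →
      (∀ i, hi ≤ i → i < p.length → m < p.getD i 0) →
      pvBisect p m lo hi = (p.takeWhile (fun s => s ≤ m)).length := by
  intro lo hi
  fun_induction pvBisect p m lo hi with
  | case1 lo hi h mid hle ih =>
    intro _ hhi hlow hhigh
    apply ih (by omega) hhi
    · intro i hi'
      by_cases hil : i < lo
      · exact hlow i hil
      · exact le_trans (pairwise_getD_mono p hp i mid (by omega) (by omega)) hle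
    · exact hhigh
  | case2 lo hi h mid hgt ih =>
    intro hlo _ hlow hhigh
    apply ih (by omega) (by omega) hlow
    intro i hi' hilen
    exact lt_of_lt_of_le (by omega : m < p.getD mid 0)
      (pairwise_getD_mono p hp mid i hi' hilen)
  | case3 lo hi h =>
    intro hlo hhi hlow hhigh
    have hlohi : lo = hi := by omega
    subst hlohi
    symm
    apply takeWhile_length_eq _ p lo hhi
    · intro i hi'
      exact decide_eq_true (hlow i hi')
    · intro hlt
      exact decide_eq_false (not_le.mpr (hhigh lo (le_refl _) hlt))

-- ===== VERDICT (by name: the statement is the Claim_ definition above) =====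
theorem compose_context_py_spec : Claim_equal_compose_context_py := by
  intro docs max_chars _
  unfold Spec_compose_context_py compose_context_py compose_context_py_alt
  rw [composeLoopA_eq]
  have hlen := pvPrefixSums_length (docs.map pvBlock) 0
  dsimp only
  rw [pvBisect_eq (pvPrefixSums (docs.map pvBlock) 0) max_chars
    (pvPrefixSums_pairwise (docs.map pvBlock) 0) 0 (docs.map pvBlock).length
    (Nat.zero_le _) (by omega)
    (by intro i hi; omega)
    (by intro i hi hilen; omega)]
  simp
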